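-- pv_equiv track=rewrite | github.com/alanloko/Python-guia-8 | parcialSegundoCuatri.py | columnas_repetidas
-- ===== SOURCE A (Python) =====
-- def columnas_repetidas(mat : list[list[int]]):
--     longitud : int = int(len(mat[0]) / 2)
--     sonIguales : bool = True
--     for i in range(len(mat)):
--         for j in range(longitud):
--             if(mat[i][j] != mat[i][j+longitud]):
--                 sonIguales = False
--     return sonIguales
-- ===== SOURCE B (Python) =====
-- def columnas_repetidas(mat: list[list[int]]):
--     longitud: int = int(len(mat[0]) / 2)
--     cols = list(zip(*mat))
--     return cols[:longitud] == cols[longitud:2 * longitud]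
-- ===== Notes on version B (the rewrite author's own statement) =====
-- stated objective: alternative
-- what changed: Works column-wise instead of row-wise: transposes the matrix with zip(*mat) and compares the block of the first longitud columns with the block of the next longitud columns as whole lists, instead of A's nested row/cell loops toggling a boolean flag.
import Mathlib
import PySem

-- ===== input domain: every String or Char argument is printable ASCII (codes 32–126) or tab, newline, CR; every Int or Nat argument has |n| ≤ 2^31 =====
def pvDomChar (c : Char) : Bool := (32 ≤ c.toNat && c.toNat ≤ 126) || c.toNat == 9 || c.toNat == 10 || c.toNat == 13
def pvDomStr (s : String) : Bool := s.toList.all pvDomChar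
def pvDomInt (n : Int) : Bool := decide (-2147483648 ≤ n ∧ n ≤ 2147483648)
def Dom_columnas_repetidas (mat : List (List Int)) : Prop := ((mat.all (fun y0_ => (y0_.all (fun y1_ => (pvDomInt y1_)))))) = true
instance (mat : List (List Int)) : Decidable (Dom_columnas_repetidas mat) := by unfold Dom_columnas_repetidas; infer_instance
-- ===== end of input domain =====

-- B works column-wise: it transposes the matrix (zip(*mat)) and compares the first longitud
-- columns with the next longitud columns as whole lists, instead of A's row-wise cell scan
-- with a boolean flag (alternative decomposition, same cost).


-- ===== PORT A =====
-- longitud = int(len(mat[0]) / 2): len is a Nat, so truncating float division is Nat division by 2.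
-- mat[i] / mat[i][j] indices are nonnegative and in range under Pre_, so getD is exact there.
def columnas_repetidas (mat : List (List Int)) : Bool :=
  let longitud : Nat := ((PySem.List.pyGet? mat 0).getD []).length / 2
  (List.range mat.length).foldl (fun son i =>
    (List.range longitud).foldl (fun son j =>
      if (mat.getD i []).getD j 0 ≠ (mat.getD i []).getD (j + longitud) 0 then false else son)
      son)
    true

-- ===== PORT B =====
-- zip(*mat): columns j for j < the minimum row length (Python's zip truncates to the shortest
-- row); ported as this standard contract of the zip builtin.
def pyZipStar (mat : List (List Int)) : List (List Int) :=
  (List.range ((mat.map List.length).min?.getD 0)).map (fun j => mat.map (fun row => row.getD j 0))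

def columnas_repetidas_alt (mat : List (List Int)) : Bool :=
  let longitud : Nat := ((PySem.List.pyGet? mat 0).getD []).length / 2
  let cols := pyZipStar mat
  PySem.List.slice cols none (some (longitud : Int))
    == PySem.List.slice cols (some (longitud : Int)) (some (2 * (longitud : Int)))

-- ===== PRECONDITION & SPEC =====
-- A raises IndexError on the empty matrix (mat[0]) and whenever some row is shorter than
-- 2*longitud (mat[i][j+longitud]); Pre_ excludes exactly those inputs.
def Pre_columnas_repetidas (mat : List (List Int)) : Prop :=
  mat ≠ [] ∧ ∀ row ∈ mat, 2 * ((mat.headD []).length / 2) ≤ row.length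
instance (mat : List (List Int)) : Decidable (Pre_columnas_repetidas mat) := by
  unfold Pre_columnas_repetidas; infer_instance
def pvWitness_columnas_repetidas : List (List Int) := [[1, 2, 1, 2], [3, 4, 3, 4]]

def Spec_columnas_repetidas (mat : List (List Int)) (out : Bool) : Prop := out = columnas_repetidas_alt mat
instance (mat : List (List Int)) (out : Bool) : Decidable (Spec_columnas_repetidas mat out) := by unfold Spec_columnas_repetidas; infer_instance

-- ===== CLAIM (what is proved, stated in full; the proofs are below) =====
def Claim_equal_columnas_repetidas : Prop := ∀ (mat : List (List Int)), Dom_columnas_repetidas mat → Pre_columnas_repetidas mat → Spec_columnas_repetidas mat (columnas_repetidas mat)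

-- ===== LEMMAS AND PROOFS =====

-- A's inner loop: folding "if mismatch then False" over a list is the initial flag && all-match.
lemma foldl_flag (l : List Nat) (p : Nat → Prop) [DecidablePred p] (b : Bool) :
    l.foldl (fun s j => if p j then false else s) b = (b && l.all (fun j => !decide (p j))) := by
  induction l generalizing b with
  | nil => simp
  | cons x xs ih =>
    simp only [List.foldl_cons, List.all_cons, ih]
    by_cases h : p x <;> simp [h]

-- Index-form all over range mat.length equals element-form all.
lemma all_range_getD (mat : List (List Int)) (P : List Int → Bool) :
    (List.range mat.length).all (fun i => P (mat.getD i [])) = mat.all P := by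
  rw [Bool.eq_iff_iff]
  simp only [List.all_eq_true, List.mem_range]
  constructor
  · intro hp row hrow
    obtain ⟨i, hi, rfl⟩ := List.getElem_of_mem hrow
    have := hp i hi
    rwa [List.getD_eq_getElem?_getD, List.getElem?_eq_getElem hi] at this
  · intro hp i hi
    rw [List.getD_eq_getElem?_getD, List.getElem?_eq_getElem hi]
    exact hp _ (List.getElem_mem hi)

-- A's double loop is True iff every row matches at every column index below L.
lemma a_char (mat : List (List Int)) (L : Nat) :
    ((List.range mat.length).foldl (fun son i =>
      (List.range L).foldl (fun son j =>
        if (mat.getD i []).getD j 0 ≠ (mat.getD i []).getD (j + L) 0 then false else son) son) true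
      = true)
    ↔ (∀ row ∈ mat, ∀ j < L, row.getD j 0 = row.getD (j + L) 0) := by
  have hout : ∀ (l : List Nat) (b : Bool),
      l.foldl (fun son i =>
        (List.range L).foldl (fun son j =>
          if (mat.getD i []).getD j 0 ≠ (mat.getD i []).getD (j + L) 0 then false else son) son) b
      = (b && l.all (fun i => (List.range L).all
          (fun j => !decide ((mat.getD i []).getD j 0 ≠ (mat.getD i []).getD (j + L) 0)))) := by
    intro l b
    induction l generalizing b with
    | nil => simp
    | cons x xs ih =>
      rw [List.foldl_cons, ih,
        foldl_flag (List.range L) (fun j => (mat.getD x []).getD j 0 ≠ (mat.getD x []).getD (j + L) 0) b,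
        List.all_cons, Bool.and_assoc]
  rw [hout, Bool.true_and,
    all_range_getD mat (fun row => (List.range L).all
      (fun j => !decide (row.getD j 0 ≠ row.getD (j + L) 0)))]
  simp [List.all_eq_true]

-- take L of drop L of range m is the shifted range, when 2*L ≤ m.
lemma take_drop_range (L m : Nat) (h : 2 * L ≤ m) :
    ((List.range m).drop L).take L = (List.range L).map (fun x => L + x) := by
  apply List.ext_getElem
  · simp; omega
  · intro i h1 h2
    simp only [List.getElem_take, List.getElem_drop, List.getElem_range, List.getElem_map]

-- ===== VERDICT (by name: the statement is the Claim_ definition above) =====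
theorem columnas_repetidas_spec : Claim_equal_columnas_repetidas := by
  intro mat _ hpre
  obtain ⟨hne, hlen⟩ := hpre
  unfold Spec_columnas_repetidas columnas_repetidas columnas_repetidas_alt
  have hhead : (PySem.List.pyGet? mat 0).getD [] = mat.headD [] := by
    cases mat with
    | nil => simp at hne
    | cons r rs => simp [PySem.List.pyGet?, PySem.List.pyIdx?]
  simp only [hhead]
  set L := (mat.headD []).length / 2 with hL
  set m := (mat.map List.length).min?.getD 0 with hm
  -- the minimum row length is at least 2*L
  have h2Lm : 2 * L ≤ m := by
    cases hmin : (mat.map List.length).min? with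
    | none =>
      exact absurd (List.min?_eq_none_iff.mp hmin) (by simpa using hne)
    | some a =>
      have ha : a ∈ mat.map List.length := List.min?_mem hmin
      obtain ⟨row, hrow, rfl⟩ := List.mem_map.mp ha
      simp only [hm, hmin, Option.getD_some]
      exact hlen row hrow
  -- B side: the two slices of the transposed matrix are the two blocks of columns
  have hcols : pyZipStar mat
      = (List.range m).map (fun j => mat.map (fun row => row.getD j 0)) := rfl
  rw [hcols, PySem.List.slice_to_natCast]
  have h2 : (2 * (L : Int)) = ((2 * L : Nat) : Int) := by push_cast; ring
  rw [h2, PySem.List.slice_natCast]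
  have hsub : 2 * L - L = L := by omega
  rw [hsub, ← List.map_take, ← List.map_drop, ← List.map_take,
    List.take_range, take_drop_range L m h2Lm, List.map_map]
  have hminL : min L m = L := by omega
  rw [hminL, Bool.eq_iff_iff, a_char mat L, beq_iff_eq, List.map_inj_left]
  constructor
  · intro hp j hj
    simp only [List.mem_range] at hj
    simp only [Function.comp_apply, List.map_inj_left]
    intro row hrow
    rw [hp row hrow j hj]
    congr 1
    omega
  · intro hp row hrow j hj
    have := hp j (List.mem_range.mpr hj)
    simp only [Function.comp_apply, List.map_inj_left] at this
    rw [this row hrow]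
    congr 1
    omega
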